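-- pv_equiv track=rewrite | github.com/minjacho42/alogStudy | baekjoon/2529.py | big
-- ===== SOURCE A (Python) =====
-- def big(sign, answer):
--     if len(answer) < 1:
--         for n in range(9, -1, -1):
--             result = big(sign, [n])
--             if result:
--                 return result
--     else:
--         if sign[0] == '>':
--             for n in range(answer[len(answer)-1]-1, -1, -1):
--                 if n not in answer:
--                     if len(sign) > 1:
--                         result = big(sign[1:], answer+[n])
--                         if result:
--                             return result
--                     else:
--                         return answer+[n]
--         else:
--             for n in range(9, answer[len(answer)-1], -1):
--                 if n not in answer:
--                     if len(sign) > 1: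
--                         result = big(sign[1:], answer+[n])
--                         if result:
--                             return result
--                     else:
--                         return answer+[n]
-- ===== SOURCE B (Python) =====
-- # B: greedy forward construction instead of A's backtracking search. Each digit
-- # is chosen once, validated by a closed-form counting test (how many unused
-- # digits lie above/below the last one, against the length of the leading sign
-- # run), so no search tree is explored and nothing is ever undone.
--
-- def run_len(sign):
--     # length of the leading run of same-direction signs ('>' vs not-'>')
--     if not sign:
--         return 0
--     down = sign[0] == '>'
--     c = 1
--     while c < len(sign) and (sign[c] == '>') == down:
--         c += 1
--     return c
--
--
-- def feasible(sign, v, used):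
--     # can `sign` still be completed when the last placed digit is v?
--     if not sign:
--         return True
--     free = [d for d in range(10) if d not in used]
--     above = sum(1 for d in free if d > v)
--     below = sum(1 for d in free if d < v)
--     if len(sign) > above + below:
--         return False
--     return run_len(sign) <= (below if sign[0] == '>' else above)
--
--
-- def extend(sign, res):
--     while sign:
--         v = res[-1]
--         cands = range(v - 1, -1, -1) if sign[0] == '>' else range(9, v, -1)
--         for n in cands:
--             if n not in res and feasible(sign[1:], n, res + [n]):
--                 res = res + [n]
--                 break
--         else:
--             return None
--         sign = sign[1:]
--     return res
--
--
-- def big(sign, answer):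
--     if len(answer) < 1:
--         for n in range(9, -1, -1):
--             if feasible(sign, n, [n]):
--                 return extend(sign, [n])
--         return None
--     return extend(sign, answer)
-- ===== Notes on version B (the rewrite author's own statement) =====
-- stated objective: alternative
-- what changed: Replaces A's recursive backtracking search (try each digit descending, recurse, undo on failure) by a one-pass greedy construction: each digit is validated by a closed-form counting test (unused digits above/below the last digit against the leading same-direction sign-run length), so no search tree is explored; …
import Mathlib
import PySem

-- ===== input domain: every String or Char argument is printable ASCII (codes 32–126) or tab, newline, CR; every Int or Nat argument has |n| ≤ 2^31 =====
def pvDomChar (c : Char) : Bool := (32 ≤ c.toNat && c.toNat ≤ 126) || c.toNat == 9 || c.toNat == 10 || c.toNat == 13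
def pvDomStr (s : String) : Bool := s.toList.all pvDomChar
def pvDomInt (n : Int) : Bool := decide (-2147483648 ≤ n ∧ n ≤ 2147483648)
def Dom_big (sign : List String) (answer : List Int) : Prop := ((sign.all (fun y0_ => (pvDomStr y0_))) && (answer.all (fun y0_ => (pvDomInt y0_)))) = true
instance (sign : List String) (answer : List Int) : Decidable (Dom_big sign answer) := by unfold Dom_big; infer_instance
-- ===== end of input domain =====

-- B replaces A's recursive backtracking by a one-pass greedy construction whose digit
-- choices are validated by a closed-form counting feasibility test; on the
-- domain stated by Pre_ below B returns A's exact value.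

-- ===== PORT A =====

-- Python truthiness of `result` (None or a list)
def pyTruthyL (r : Option (List Int)) : Bool :=
  match r with
  | none => false
  | some l => !l.isEmpty

mutual
-- literal transliteration of A: recursive backtracking, first truthy result wins;
-- each Python `for n in range(a, b, -1)` is ported lazily as the countdown it is
def big (sign : List String) (answer : List Int) : Option (List Int) :=
  if answer.length < 1 then
    bigInit sign 9
  else
    match sign with
    | [] => none  -- Python raises IndexError on sign[0]; excluded by Pre_big
    | s0 :: rest =>
      match PySem.List.pyGet? answer ((answer.length : Int) - 1) with
      | none => none  -- unreachable: answer ≠ []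
      | some v =>
        if s0 == ">" then bigLoop rest answer (v - 1) (-1)
        else bigLoop rest answer 9 v
termination_by (sign.length, 2 - min answer.length 1, 0)

-- `for n in range(9, -1, -1): result = big(sign, [n]); if result: return result`
def bigInit (sign : List String) (n : Int) : Option (List Int) :=
  if -1 < n then
    let result := big sign [n]
    if pyTruthyL result then result else bigInit sign (n - 1)
  else none
termination_by (sign.length, 1, (n + 1).toNat)

-- the two symmetric `for n in range(…, …, -1)` loops of A's nonempty-answer branch
def bigLoop (rest : List String) (answer : List Int) (n stop : Int) : Option (List Int) :=
  if stop < n then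
    if answer.contains n then bigLoop rest answer (n - 1) stop
    else if rest.length > 0 then
      let result := big rest (answer ++ [n])
      if pyTruthyL result then result else bigLoop rest answer (n - 1) stop
    else some (answer ++ [n])
  else none
termination_by (rest.length + 1, 0, (n - stop).toNat)
end

-- ===== PORT B =====

-- free = [d for d in range(10) if d not in used]
def bandL (used : List Int) : List Int :=
  (PySem.List.pyRange 0 10 1).filter (fun d => !used.contains d)

-- run_len's while loop: leading run of same-direction signs
def runLenGo (down : Bool) (sign : List String) : Nat :=
  match sign with
  | [] => 0
  | t :: r => if ((t == ">") == down) then 1 + runLenGo down r else 0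

def runLen (sign : List String) : Nat :=
  match sign with
  | [] => 0
  | s :: rest => 1 + runLenGo (s == ">") rest

-- the counting body of B's `feasible` (above/below counts vs the leading run)
def inBand (sign : List String) (v : Int) (S : List Int) : Bool :=
  let a := S.countP (fun d => decide (v < d))
  let b := S.countP (fun d => decide (d < v))
  if a + b < sign.length then false
  else match sign with
    | [] => true
    | s :: _ => if s == ">" then decide (runLen sign ≤ b) else decide (runLen sign ≤ a)

def feasible (sign : List String) (v : Int) (used : List Int) : Bool :=
  match sign with
  | [] => true
  | _ :: _ => inBand sign v (bandL used)

-- `for n in cands: if n not in res and feasible(sign[1:], n, res + [n]): …; break`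
-- (cands is a lazy descending range: counter n down to exclusive stop)
def pickGo (rest : List String) (res : List Int) (n stop : Int) : Option Int :=
  if stop < n then
    if !res.contains n && feasible rest n (res ++ [n]) then some n
    else pickGo rest res (n - 1) stop
  else none
termination_by (n - stop).toNat

-- extend's while loop over the signs
def extendGo (sign : List String) (res : List Int) : Option (List Int) :=
  match sign with
  | [] => some res
  | s :: rest =>
    match PySem.List.pyGet? res (-1) with
    | none => none  -- unreachable: res ≠ []
    | some v =>
      let nstop : Int × Int := if s == ">" then (v - 1, -1) else (9, v)
      match pickGo rest res nstop.1 nstop.2 with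
      | none => none
      | some n => extendGo rest (res ++ [n])

def bigAltInit (sign : List String) (n : Int) : Option (List Int) :=
  if -1 < n then
    if feasible sign n [n] then extendGo sign [n]
    else bigAltInit sign (n - 1)
  else none
termination_by (n + 1).toNat

def big_alt (sign : List String) (answer : List Int) : Option (List Int) :=
  if answer.length < 1 then bigAltInit sign 9
  else extendGo sign answer

-- ===== PRECONDITION & SPEC =====

-- Pre_ restricts to the inputs where A's search is a search over digits: sign
-- nonempty (on empty sign A evaluates sign[0] and raises IndexError), and the LAST
-- answer value, if any, must not start a descending scan through values outside 0-9
-- (first sign '>'-like with last ≥ 11, or '<'-like with last ≤ -2) — the caller only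
-- ever passes answer=[]; on those starts A's backtracking wanders through non-digit
-- values, an accident of its range bounds that B's digit-counting test deliberately
-- does not model (see the cite in claim.json).
def Pre_big (sign : List String) (answer : List Int) : Prop :=
  sign ≠ [] ∧ (match sign.head?, answer.getLast? with
    | some s, some v => if s == ">" then decide (v ≤ 10) else decide (-1 ≤ v)
    | _, _ => true) = true
instance (sign : List String) (answer : List Int) : Decidable (Pre_big sign answer) := by unfold Pre_big; infer_instance
def pvWitness_big : List String × List Int := (["<", ">"], [5])


def Spec_big (sign : List String) (answer : List Int) (out : Option (List Int)) : Prop := out = big_alt sign answer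
instance (sign : List String) (answer : List Int) (out : Option (List Int)) : Decidable (Spec_big sign answer out) := by unfold Spec_big; infer_instance

-- ===== CLAIM (what is proved, stated in full; the proofs are below) =====
def Claim_equal_big : Prop := ∀ (sign : List String) (answer : List Int), Dom_big sign answer → Pre_big sign answer → Spec_big sign answer (big sign answer)

-- ===== LEMMAS AND PROOFS =====

-- ---- counting infrastructure ----

def aCnt (v : Int) (S : List Int) : Nat := S.countP (fun x => decide (v < x))
def bCnt (v : Int) (S : List Int) : Nat := S.countP (fun x => decide (x < v))

theorem cnt_add_of_not_mem (v : Int) (S : List Int) (hv : v ∉ S) :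
    aCnt v S + bCnt v S = S.length := by
  induction S with
  | nil => simp [aCnt, bCnt]
  | cons x xs ih =>
    simp at hv
    have hx : x ≠ v := fun h => hv.1 h.symm
    have := ih hv.2
    by_cases h1 : v < x
    · simp [aCnt, bCnt, List.countP_cons, h1, not_lt.mpr (le_of_lt h1)] at *
      omega
    · have h2 : x < v := lt_of_le_of_ne (not_lt.mp h1) hx
      simp [aCnt, bCnt, List.countP_cons, h1, h2] at *
      omega

theorem cnt_add_of_mem (n : Int) (S : List Int) (hn : n ∈ S) (hnd : S.Nodup) :
    aCnt n S + bCnt n S = S.length - 1 ∧ 1 ≤ S.length := by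
  induction S with
  | nil => simp at hn
  | cons x xs ih =>
    simp at hn
    rcases hn with h | h
    · subst h
      have hx : n ∈ xs → False := fun hm => (List.nodup_cons.mp hnd).1 hm
      have := cnt_add_of_not_mem n xs (fun hm => hx hm)
      simp [aCnt, bCnt, List.countP_cons] at *
      omega
    · have hnd' := (List.nodup_cons.mp hnd).2
      have hxn : x ≠ n := fun he => (List.nodup_cons.mp hnd).1 (he ▸ h)
      have := ih h hnd'
      rcases lt_trichotomy n x with h1 | h1 | h1
      · simp [aCnt, bCnt, List.countP_cons, h1, not_lt.mpr (le_of_lt h1)] at *; omega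
      · exact absurd h1.symm hxn
      · simp [aCnt, bCnt, List.countP_cons, h1, not_lt.mpr (le_of_lt h1)] at *; omega

theorem aCnt_lt_of_mem (n v : Int) (S : List Int) (hn : n ∈ S) (hv : v < n) :
    aCnt n S + 1 ≤ aCnt v S := by
  induction S with
  | nil => simp at hn
  | cons x xs ih =>
    simp at hn
    rcases hn with h | h
    · subst h
      have : xs.countP (fun x => decide (n < x)) ≤ xs.countP (fun x => decide (v < x)) := by
        apply List.countP_mono_left
        intro a _ hna
        simp at hna ⊢; omega
      unfold aCnt
      rw [List.countP_cons, List.countP_cons]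
      simp [hv]
      omega
    · have hih := ih h
      unfold aCnt at hih ⊢
      rw [List.countP_cons, List.countP_cons]
      by_cases h1 : v < x <;> by_cases h2 : n < x <;> simp [h1, h2] <;> omega

theorem bCnt_lt_of_mem (n v : Int) (S : List Int) (hn : n ∈ S) (hv : n < v) :
    bCnt n S + 1 ≤ bCnt v S := by
  induction S with
  | nil => simp at hn
  | cons x xs ih =>
    simp at hn
    rcases hn with h | h
    · subst h
      have : xs.countP (fun x => decide (x < n)) ≤ xs.countP (fun x => decide (x < v)) := by
        apply List.countP_mono_left
        intro a _ hna
        simp at hna ⊢; omega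
      unfold bCnt
      rw [List.countP_cons, List.countP_cons]
      simp [hv]
      omega
    · have hih := ih h
      unfold bCnt at hih ⊢
      rw [List.countP_cons, List.countP_cons]
      by_cases h1 : x < v <;> by_cases h2 : x < n <;> simp [h1, h2] <;> omega

theorem filter_cone_ne_nil (p : Int → Bool) (S : List Int) (h : 1 ≤ S.countP p) :
    S.filter p ≠ [] := by
  intro hc
  rw [List.countP_eq_length_filter, hc] at h
  simp at h

theorem countP_add_not (p : Int → Bool) (T : List Int) :
    T.countP p + T.countP (fun x => !p x) = T.length := by
  induction T with
  | nil => simp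
  | cons x xs ih => by_cases h : p x = true <;> simp [List.countP_cons, h] <;> omega

-- minimal element of the upper cone: one fewer above it, none between
theorem exists_min_above (v : Int) (S : List Int) (hnd : S.Nodup) (h : 1 ≤ aCnt v S) :
    ∃ n ∈ S, v < n ∧ aCnt n S = aCnt v S - 1 := by
  set T := S.filter (fun x => decide (v < x)) with hT
  have hTne : T ≠ [] := filter_cone_ne_nil _ _ h
  obtain ⟨n, hn⟩ : ∃ n, T.min? = some n := by
    cases hTm : T.min? with
    | none => exact absurd (List.min?_eq_none_iff.mp hTm) hTne
    | some n => exact ⟨n, rfl⟩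
  obtain ⟨hnT, hmin⟩ := List.min?_eq_some_iff.mp hn
  have hnS : n ∈ S := (List.mem_filter.mp hnT).1
  have hvn : v < n := by have := (List.mem_filter.mp hnT).2; simpa using this
  refine ⟨n, hnS, hvn, ?_⟩
  have hTnd : T.Nodup := hnd.filter _
  have hsub : S.filter (fun x => decide (n < x)) = T.filter (fun x => decide (n < x)) := by
    rw [hT, List.filter_filter]
    apply List.filter_congr
    intro x _
    by_cases hx : n < x
    · simp [hx]; omega
    · simp [hx]
  have hsplit : T.countP (fun x => decide (n < x)) + T.countP (fun x => !decide (n < x)) = T.length :=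
    countP_add_not _ _
  have hone : T.countP (fun x => !decide (n < x)) = 1 := by
    have hcongr : T.countP (fun x => !decide (n < x)) = T.countP (fun x => x == n) := by
      apply List.countP_congr
      intro x hx
      have hle : n ≤ x := hmin x hx
      constructor
      · intro hxx; simp at hxx ⊢; omega
      · intro hxx; simp at hxx ⊢; omega
    rw [hcongr]
    have : T.countP (fun x => x == n) = T.count n := rfl
    rw [this, List.count_eq_one_of_mem hTnd hnT]
  have hlen : T.length = S.countP (fun x => decide (v < x)) := by
    rw [hT, List.countP_eq_length_filter]
  unfold aCnt at h ⊢
  rw [List.countP_eq_length_filter, hsub, ← List.countP_eq_length_filter]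
  omega

-- maximal element of the upper cone: nothing of S above it
theorem exists_max_above (v : Int) (S : List Int) (hnd : S.Nodup) (h : 1 ≤ aCnt v S) :
    ∃ n ∈ S, v < n ∧ aCnt n S = 0 := by
  set T := S.filter (fun x => decide (v < x)) with hT
  have hTne : T ≠ [] := filter_cone_ne_nil _ _ h
  obtain ⟨n, hn⟩ : ∃ n, T.max? = some n := by
    cases hTm : T.max? with
    | none => exact absurd (List.max?_eq_none_iff.mp hTm) hTne
    | some n => exact ⟨n, rfl⟩
  obtain ⟨hnT, hmax⟩ := List.max?_eq_some_iff.mp hn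
  have hnS : n ∈ S := (List.mem_filter.mp hnT).1
  have hvn : v < n := by have := (List.mem_filter.mp hnT).2; simpa using this
  refine ⟨n, hnS, hvn, ?_⟩
  unfold aCnt
  rw [List.countP_eq_zero]
  intro x hx
  simp only [decide_eq_true_eq]
  intro hnx
  have hxT : x ∈ T := by
    rw [hT, List.mem_filter]
    exact ⟨hx, by simp; omega⟩
  have := hmax x hxT
  omega

theorem exists_max_below (v : Int) (S : List Int) (hnd : S.Nodup) (h : 1 ≤ bCnt v S) :
    ∃ n ∈ S, n < v ∧ bCnt n S = bCnt v S - 1 := by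
  set T := S.filter (fun x => decide (x < v)) with hT
  have hTne : T ≠ [] := filter_cone_ne_nil _ _ h
  obtain ⟨n, hn⟩ : ∃ n, T.max? = some n := by
    cases hTm : T.max? with
    | none => exact absurd (List.max?_eq_none_iff.mp hTm) hTne
    | some n => exact ⟨n, rfl⟩
  obtain ⟨hnT, hmax⟩ := List.max?_eq_some_iff.mp hn
  have hnS : n ∈ S := (List.mem_filter.mp hnT).1
  have hvn : n < v := by have := (List.mem_filter.mp hnT).2; simpa using this
  refine ⟨n, hnS, hvn, ?_⟩
  have hTnd : T.Nodup := hnd.filter _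
  have hsub : S.filter (fun x => decide (x < n)) = T.filter (fun x => decide (x < n)) := by
    rw [hT, List.filter_filter]
    apply List.filter_congr
    intro x _
    by_cases hx : x < n
    · simp [hx]; omega
    · simp [hx]
  have hsplit : T.countP (fun x => decide (x < n)) + T.countP (fun x => !decide (x < n)) = T.length :=
    countP_add_not _ _
  have hone : T.countP (fun x => !decide (x < n)) = 1 := by
    have hcongr : T.countP (fun x => !decide (x < n)) = T.countP (fun x => x == n) := by
      apply List.countP_congr
      intro x hx
      have hle : x ≤ n := hmax x hx
      constructor
      · intro hxx; simp at hxx ⊢; omega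
      · intro hxx; simp at hxx ⊢; omega
    rw [hcongr]
    have : T.countP (fun x => x == n) = T.count n := rfl
    rw [this, List.count_eq_one_of_mem hTnd hnT]
  have hlen : T.length = S.countP (fun x => decide (x < v)) := by
    rw [hT, List.countP_eq_length_filter]
  unfold bCnt at h ⊢
  rw [List.countP_eq_length_filter, hsub, ← List.countP_eq_length_filter]
  omega

theorem exists_min_below (v : Int) (S : List Int) (hnd : S.Nodup) (h : 1 ≤ bCnt v S) :
    ∃ n ∈ S, n < v ∧ bCnt n S = 0 := by
  set T := S.filter (fun x => decide (x < v)) with hT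
  have hTne : T ≠ [] := filter_cone_ne_nil _ _ h
  obtain ⟨n, hn⟩ : ∃ n, T.min? = some n := by
    cases hTm : T.min? with
    | none => exact absurd (List.min?_eq_none_iff.mp hTm) hTne
    | some n => exact ⟨n, rfl⟩
  obtain ⟨hnT, hmin⟩ := List.min?_eq_some_iff.mp hn
  have hnS : n ∈ S := (List.mem_filter.mp hnT).1
  have hvn : n < v := by have := (List.mem_filter.mp hnT).2; simpa using this
  refine ⟨n, hnS, hvn, ?_⟩
  unfold bCnt
  rw [List.countP_eq_zero]
  intro x hx
  simp only [decide_eq_true_eq]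
  intro hnx
  have hxT : x ∈ T := by
    rw [hT, List.mem_filter]
    exact ⟨hx, by simp; omega⟩
  have := hmin x hxT
  omega

-- ---- band facts ----
theorem mem_bandL (used : List Int) (d : Int) :
    d ∈ bandL used ↔ 0 ≤ d ∧ d ≤ 9 ∧ d ∉ used := by
  unfold bandL
  rw [List.mem_filter, PySem.List.mem_pyRange_one]
  simp
  exact ⟨fun ⟨⟨h1, h2⟩, h3⟩ => ⟨h1, by omega, h3⟩, fun ⟨h1, h2, h3⟩ => ⟨⟨h1, by omega⟩, h3⟩⟩

theorem nodup_bandL (used : List Int) : (bandL used).Nodup :=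
  (PySem.List.nodup_pyRange_one 0 10).filter _

theorem bandL_append (used : List Int) (n : Int) :
    bandL (used ++ [n]) = (bandL used).filter (fun d => !(d == n)) := by
  unfold bandL
  rw [List.filter_filter]
  apply List.filter_congr
  intro x _
  by_cases h1 : x ∈ used <;> by_cases h2 : x = n <;> simp [h1, h2]

-- ---- runLen and inBand characterizations ----

theorem runLenGo_le (d : Bool) (sign : List String) : runLenGo d sign ≤ sign.length := by
  induction sign with
  | nil => simp [runLenGo]
  | cons t r ih =>
    unfold runLenGo
    split <;> simp <;> omega

theorem runLen_le_length (sign : List String) : runLen sign ≤ sign.length := by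
  cases sign with
  | nil => simp [runLen]
  | cons s rest =>
    have := runLenGo_le (s == ">") rest
    simp [runLen]
    omega

theorem runLen_pos (s : String) (rest : List String) : 1 ≤ runLen (s :: rest) := by
  simp [runLen]

theorem runLen_single (s : String) : runLen [s] = 1 := by
  simp [runLen, runLenGo]

theorem runLen_cons_same (s t : String) (r : List String) (h : (t == ">") = (s == ">")) :
    runLen (s :: t :: r) = 1 + runLen (t :: r) := by
  simp [runLen, runLenGo, h]

theorem runLen_cons_break (s t : String) (r : List String) (h : (t == ">") ≠ (s == ">")) :
    runLen (s :: t :: r) = 1 := by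
  simp [runLen, runLenGo, h]

theorem inBand_nil (v : Int) (S : List Int) : inBand [] v S = true := by
  simp [inBand]

theorem inBand_cons_iff (s : String) (rest : List String) (v : Int) (S : List Int) :
    inBand (s :: rest) v S = true ↔
      ((s :: rest).length ≤ aCnt v S + bCnt v S ∧
       runLen (s :: rest) ≤ (if (s == ">") = true then bCnt v S else aCnt v S)) := by
  unfold inBand aCnt bCnt
  simp only [List.length_cons]
  split
  · constructor
    · intro hc; exact absurd hc (by simp)
    · intro ⟨h1, _⟩; omega
  · by_cases hs : (s == ">") = true <;> simp [hs] <;> omega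

-- inBand is insensitive to removing its own pivot from S
theorem inBand_filter_ne (sign : List String) (n : Int) (S : List Int) :
    inBand sign n (S.filter (fun d => !(d == n))) = inBand sign n S := by
  have ha : aCnt n (S.filter (fun d => !(d == n))) = aCnt n S := by
    unfold aCnt
    rw [List.countP_filter]
    apply List.countP_congr
    intro x _
    by_cases hx : n < x <;> by_cases he : x = n <;> simp [hx, he] <;> omega
  have hb : bCnt n (S.filter (fun d => !(d == n))) = bCnt n S := by
    unfold bCnt
    rw [List.countP_filter]
    apply List.countP_congr
    intro x _
    by_cases hx : x < n <;> by_cases he : x = n <;> simp [hx, he] <;> omega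
  cases sign with
  | nil => simp [inBand_nil]
  | cons s rest =>
    rcases hl : inBand (s :: rest) n S with hf | ht
    · rcases hl2 : inBand (s :: rest) n (S.filter (fun d => !(d == n))) with hf2 | ht2
      · rfl
      · have := (inBand_cons_iff _ _ _ _).mp hl2
        rw [ha, hb] at this
        have := (inBand_cons_iff _ _ _ _).mpr this
        rw [hl] at this; exact this.symm
    · have := (inBand_cons_iff _ _ _ _).mp hl
      rw [← ha, ← hb] at this
      exact (inBand_cons_iff _ _ _ _).mpr this

theorem exists_above_iff (v : Int) (S : List Int) : (∃ n ∈ S, v < n) ↔ 1 ≤ aCnt v S := by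
  unfold aCnt
  rw [Nat.one_le_iff_ne_zero, ← Nat.pos_iff_ne_zero, List.countP_pos_iff]
  simp

theorem exists_below_iff (v : Int) (S : List Int) : (∃ n ∈ S, n < v) ↔ 1 ≤ bCnt v S := by
  unfold bCnt
  rw [Nat.one_le_iff_ne_zero, ← Nat.pos_iff_ne_zero, List.countP_pos_iff]
  simp

-- ---- the two core band lemmas: one greedy step is complete and sound ----

theorem inBand_cons_lt (s : String) (rest : List String) (v : Int) (S : List Int)
    (hs : (s == ">") = false) :
    inBand (s :: rest) v S = true ↔
      (rest.length + 1 ≤ aCnt v S + bCnt v S ∧ runLen (s :: rest) ≤ aCnt v S) := by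
  rw [inBand_cons_iff, hs]
  simp only [List.length_cons, Bool.false_eq_true, if_neg (by simp : ¬(False = True))]
  exact Iff.rfl

theorem inBand_cons_gt (s : String) (rest : List String) (v : Int) (S : List Int)
    (hs : (s == ">") = true) :
    inBand (s :: rest) v S = true ↔
      (rest.length + 1 ≤ aCnt v S + bCnt v S ∧ runLen (s :: rest) ≤ bCnt v S) := by
  rw [inBand_cons_iff, hs]
  simp only [List.length_cons, if_pos rfl]
  exact Iff.rfl

theorem core_lt (s : String) (rest : List String) (v : Int) (S : List Int)
    (hs : (s == ">") = false) (hnd : S.Nodup) (hvS : v ∉ S) :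
    inBand (s :: rest) v S = true ↔ ∃ n ∈ S, v < n ∧ inBand rest n S = true := by
  have htot : aCnt v S + bCnt v S = S.length := cnt_add_of_not_mem v S hvS
  rw [inBand_cons_lt s rest v S hs]
  cases rest with
  | nil =>
    rw [runLen_single]
    simp only [List.length_nil]
    constructor
    · intro ⟨h1, h2⟩
      obtain ⟨n, hnS, hvn, _⟩ := exists_min_above v S hnd h2
      exact ⟨n, hnS, hvn, inBand_nil n S⟩
    · intro ⟨n, hnS, hvn, _⟩
      have h1 := (exists_above_iff v S).mp ⟨n, hnS, hvn⟩
      exact ⟨by omega, h1⟩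
  | cons t r =>
    by_cases hd : (t == ">") = (s == ">")
    · rw [runLen_cons_same s t r hd]
      rw [hs] at hd
      constructor
      · intro ⟨h1, h2⟩
        have hpos : 1 ≤ aCnt v S := by have := runLen_pos t r; omega
        obtain ⟨n, hnS, hvn, hcnt⟩ := exists_min_above v S hnd hpos
        have hmem := cnt_add_of_mem n S hnS hnd
        refine ⟨n, hnS, hvn, ?_⟩
        rw [inBand_cons_lt t r n S hd]
        simp only [List.length_cons] at h1
        exact ⟨by omega, by omega⟩
      · intro ⟨n, hnS, hvn, hib⟩
        rw [inBand_cons_lt t r n S hd] at hib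
        obtain ⟨h1, h2⟩ := hib
        have hlt := aCnt_lt_of_mem n v S hnS hvn
        have hmem := cnt_add_of_mem n S hnS hnd
        simp only [List.length_cons]
        exact ⟨by omega, by omega⟩
    · rw [runLen_cons_break s t r hd]
      rw [hs] at hd
      have hdt : (t == ">") = true := by
        cases ht : (t == ">") with
        | false => exact absurd ht hd
        | true => rfl
      constructor
      · intro ⟨h1, h2⟩
        obtain ⟨n, hnS, hvn, hcnt⟩ := exists_max_above v S hnd h2
        have hmem := cnt_add_of_mem n S hnS hnd
        have hrl := runLen_le_length (t :: r)
        refine ⟨n, hnS, hvn, ?_⟩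
        rw [inBand_cons_gt t r n S hdt]
        simp only [List.length_cons] at h1 hrl ⊢
        exact ⟨by omega, by omega⟩
      · intro ⟨n, hnS, hvn, hib⟩
        rw [inBand_cons_gt t r n S hdt] at hib
        obtain ⟨h1, h2⟩ := hib
        have hpos := (exists_above_iff v S).mp ⟨n, hnS, hvn⟩
        have hmem := cnt_add_of_mem n S hnS hnd
        simp only [List.length_cons] at h1 ⊢
        exact ⟨by omega, hpos⟩

theorem core_gt (s : String) (rest : List String) (v : Int) (S : List Int)
    (hs : (s == ">") = true) (hnd : S.Nodup) (hvS : v ∉ S) :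
    inBand (s :: rest) v S = true ↔ ∃ n ∈ S, n < v ∧ inBand rest n S = true := by
  have htot : aCnt v S + bCnt v S = S.length := cnt_add_of_not_mem v S hvS
  rw [inBand_cons_gt s rest v S hs]
  cases rest with
  | nil =>
    rw [runLen_single]
    simp only [List.length_nil]
    constructor
    · intro ⟨h1, h2⟩
      obtain ⟨n, hnS, hvn, _⟩ := exists_max_below v S hnd h2
      exact ⟨n, hnS, hvn, inBand_nil n S⟩
    · intro ⟨n, hnS, hvn, _⟩
      have h1 := (exists_below_iff v S).mp ⟨n, hnS, hvn⟩
      exact ⟨by omega, h1⟩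
  | cons t r =>
    by_cases hd : (t == ">") = (s == ">")
    · rw [runLen_cons_same s t r hd]
      rw [hs] at hd
      constructor
      · intro ⟨h1, h2⟩
        have hpos : 1 ≤ bCnt v S := by have := runLen_pos t r; omega
        obtain ⟨n, hnS, hvn, hcnt⟩ := exists_max_below v S hnd hpos
        have hmem := cnt_add_of_mem n S hnS hnd
        refine ⟨n, hnS, hvn, ?_⟩
        rw [inBand_cons_gt t r n S hd]
        simp only [List.length_cons] at h1
        exact ⟨by omega, by omega⟩
      · intro ⟨n, hnS, hvn, hib⟩
        rw [inBand_cons_gt t r n S hd] at hib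
        obtain ⟨h1, h2⟩ := hib
        have hlt := bCnt_lt_of_mem n v S hnS hvn
        have hmem := cnt_add_of_mem n S hnS hnd
        simp only [List.length_cons]
        exact ⟨by omega, by omega⟩
    · rw [runLen_cons_break s t r hd]
      rw [hs] at hd
      have hdt : (t == ">") = false := by
        cases ht : (t == ">") with
        | false => rfl
        | true => exact absurd ht hd
      constructor
      · intro ⟨h1, h2⟩
        obtain ⟨n, hnS, hvn, hcnt⟩ := exists_min_below v S hnd h2
        have hmem := cnt_add_of_mem n S hnS hnd
        have hrl := runLen_le_length (t :: r)
        refine ⟨n, hnS, hvn, ?_⟩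
        rw [inBand_cons_lt t r n S hdt]
        simp only [List.length_cons] at h1 hrl ⊢
        exact ⟨by omega, by omega⟩
      · intro ⟨n, hnS, hvn, hib⟩
        rw [inBand_cons_lt t r n S hdt] at hib
        obtain ⟨h1, h2⟩ := hib
        have hpos := (exists_below_iff v S).mp ⟨n, hnS, hvn⟩
        have hmem := cnt_add_of_mem n S hnS hnd
        simp only [List.length_cons] at h1 ⊢
        exact ⟨by omega, hpos⟩

-- ---- feasible: unfolding and the one-step completeness/soundness lemma ----

def CandP (s : String) (v n : Int) : Prop :=
  if (s == ">") = true then 0 ≤ n ∧ n < v else v < n ∧ n ≤ 9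

theorem feasible_nil (v : Int) (used : List Int) : feasible [] v used = true := rfl

theorem feasible_cons (s : String) (rest : List String) (v : Int) (used : List Int) :
    feasible (s :: rest) v used = inBand (s :: rest) v (bandL used) := rfl

-- the continuation value of a chosen digit
theorem feasible_band_eq (rest : List String) (n : Int) (used : List Int) :
    feasible rest n (used ++ [n]) = inBand rest n (bandL used) := by
  cases rest with
  | nil => rw [feasible_nil, inBand_nil]
  | cons t r =>
    rw [feasible_cons t r n (used ++ [n]), bandL_append, inBand_filter_ne]

-- (⋆) the step lemma: the closed-form test accepts exactly when some candidate digit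
-- admits a full continuation
theorem step_iff (s : String) (rest : List String) (v : Int) (used : List Int)
    (hv : v ∈ used) (h0 : 0 ≤ v) (h9 : v ≤ 9) :
    feasible (s :: rest) v used = true ↔
      ∃ n, CandP s v n ∧ n ∉ used ∧ feasible rest n (used ++ [n]) = true := by
  have hnd : (bandL used).Nodup := nodup_bandL used
  have hvS : v ∉ bandL used := fun hc => ((mem_bandL used v).mp hc).2.2 hv
  rw [feasible_cons s rest v used]
  by_cases hs : (s == ">") = true
  · rw [core_gt s rest v (bandL used) hs hnd hvS]
    have hC : ∀ n, CandP s v n ↔ (0 ≤ n ∧ n < v) := fun n => by simp [CandP, hs]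
    simp only [hC]
    constructor
    · rintro ⟨n, hnS, hnv, hib⟩
      obtain ⟨hn0, hn9, hnu⟩ := (mem_bandL used n).mp hnS
      exact ⟨n, ⟨hn0, hnv⟩, hnu, by rw [feasible_band_eq rest n used]; exact hib⟩
    · rintro ⟨n, ⟨hn0, hnv⟩, hnu, hf⟩
      have hn9 : n ≤ 9 := by omega
      have hnS : n ∈ bandL used := (mem_bandL used n).mpr ⟨hn0, hn9, hnu⟩
      rw [feasible_band_eq rest n used] at hf
      exact ⟨n, hnS, hnv, hf⟩
  · have hs' : (s == ">") = false := by
      cases h : (s == ">") with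
      | false => rfl
      | true => exact absurd h hs
    rw [core_lt s rest v (bandL used) hs' hnd hvS]
    have hC : ∀ n, CandP s v n ↔ (v < n ∧ n ≤ 9) := fun n => by simp [CandP, hs']
    simp only [hC]
    constructor
    · rintro ⟨n, hnS, hnv, hib⟩
      obtain ⟨hn0, hn9, hnu⟩ := (mem_bandL used n).mp hnS
      exact ⟨n, ⟨hnv, hn9⟩, hnu, by rw [feasible_band_eq rest n used]; exact hib⟩
    · rintro ⟨n, ⟨hnv, hn9⟩, hnu, hf⟩
      have hn0 : 0 ≤ n := by omega
      have hnS : n ∈ bandL used := (mem_bandL used n).mpr ⟨hn0, hn9, hnu⟩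
      rw [feasible_band_eq rest n used] at hf
      exact ⟨n, hnS, hnv, hf⟩

-- ---- pyGet? on a concat ----

theorem pyGet?_concat_neg_one (xs : List Int) (x : Int) :
    PySem.List.pyGet? (xs ++ [x]) (-1) = some x := by
  unfold PySem.List.pyGet? PySem.List.pyIdx?
  have hlen : (xs ++ [x]).length = xs.length + 1 := by simp
  rw [hlen]
  have h1 : ¬(0 ≤ (-1 : Int)) := by omega
  have h2 : -((xs.length + 1 : Nat) : Int) ≤ -1 := by
    push_cast
    omega
  rw [if_neg h1, if_pos h2]
  simp

theorem pyGet?_concat_len (xs : List Int) (x : Int) :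
    PySem.List.pyGet? (xs ++ [x]) (((xs ++ [x]).length : Int) - 1) = some x := by
  unfold PySem.List.pyGet? PySem.List.pyIdx?
  have hlen : (xs ++ [x]).length = xs.length + 1 := by simp
  rw [hlen]
  have h1 : (0 : Int) ≤ (xs.length + 1 : Nat) - 1 := by push_cast; omega
  have h2 : ((xs.length + 1 : Nat) : Int) - 1 < ((xs.length + 1 : Nat) : Int) := by omega
  rw [if_pos h1, if_pos (by push_cast at h2 ⊢; omega)]
  have h3 : (((xs.length + 1 : Nat) : Int) - 1).toNat = xs.length := by push_cast; omega
  rw [h3]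
  simp

-- ---- the candidate interval realizes CandP ----

theorem cand_iff (s : String) (v m : Int) :
    ((if (s == ">") = true then ((v - 1, -1) : Int × Int) else (9, v)).2 < m ∧
     m ≤ (if (s == ">") = true then ((v - 1, -1) : Int × Int) else (9, v)).1) ↔ CandP s v m := by
  by_cases hs : (s == ">") = true <;> simp [hs, CandP] <;> omega

theorem candP_digit (s : String) (v n : Int) (h0 : 0 ≤ v) (h9 : v ≤ 9)
    (h : CandP s v n) : 0 ≤ n ∧ n ≤ 9 := by
  unfold CandP at h
  split at h <;> omega

-- ---- B-side loop characterizations (fuel induction on the countdown) ----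

theorem pickGo_eq_some (k : Nat) (rest : List String) (res : List Int) (n stop m : Int)
    (hk : (n - stop).toNat ≤ k) (h : pickGo rest res n stop = some m) :
    (stop < m ∧ m ≤ n) ∧ res.contains m = false ∧ feasible rest m (res ++ [m]) = true := by
  induction k generalizing n with
  | zero =>
    rw [pickGo] at h
    split at h
    · omega
    · cases h
  | succ k ih =>
    rw [pickGo] at h
    split at h
    · rename_i hlt
      split at h
      · rename_i hcond
        rw [Bool.and_eq_true] at hcond
        cases h
        exact ⟨⟨hlt, le_refl _⟩, by simpa using hcond.1, hcond.2⟩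
      · have := ih (n - 1) (by omega) h
        exact ⟨⟨this.1.1, by omega⟩, this.2⟩
    · cases h

theorem pickGo_eq_none (k : Nat) (rest : List String) (res : List Int) (n stop : Int)
    (hk : (n - stop).toNat ≤ k) (h : pickGo rest res n stop = none) :
    ∀ m, stop < m → m ≤ n → ¬(res.contains m = false ∧ feasible rest m (res ++ [m]) = true) := by
  induction k generalizing n with
  | zero =>
    rw [pickGo] at h
    split at h
    · omega
    · intro m h1 h2; omega
  | succ k ih =>
    rw [pickGo] at h
    split at h
    · rename_i hlt
      split at h
      · cases h
      · rename_i hcond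
        intro m h1 h2
        rcases eq_or_lt_of_le h2 with rfl | h2'
        · intro ⟨hc, hf⟩
          rw [Bool.and_eq_true] at hcond
          push_neg at hcond
          exact hcond (by simpa using hc) hf
        · exact ih (n - 1) (by omega) h m h1 (by omega)
    · intro m h1 h2; omega

theorem extend_ne_nil (sign : List String) (res : List Int) (l : List Int)
    (hres : res ≠ []) (h : extendGo sign res = some l) : l ≠ [] := by
  induction sign generalizing res with
  | nil =>
    unfold extendGo at h
    cases h
    exact hres
  | cons s rest ih =>
    unfold extendGo at h
    cases hg : PySem.List.pyGet? res (-1) with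
    | none => rw [hg] at h; cases h
    | some v =>
      rw [hg] at h
      dsimp only at h
      cases hp : pickGo rest res
          (if s == ">" then ((v - 1, -1) : Int × Int) else (9, v)).1
          (if s == ">" then ((v - 1, -1) : Int × Int) else (9, v)).2 with
      | none => rw [hp] at h; cases h
      | some n =>
        rw [hp] at h
        dsimp only at h
        exact ih (res ++ [n]) (by simp) h

-- ---- (Λ) the greedy loop succeeds exactly on feasible states ----

theorem extendGo_isSome (sign : List String) (res : List Int) (v : Int)
    (hv : PySem.List.pyGet? res (-1) = some v) (hm : v ∈ res)
    (h0 : 0 ≤ v) (h9 : v ≤ 9) :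
    (extendGo sign res).isSome = feasible sign v res := by
  induction sign generalizing res v with
  | nil => rfl
  | cons s rest ih =>
    unfold extendGo
    rw [hv]
    dsimp only
    cases hp : pickGo rest res
        (if s == ">" then ((v - 1, -1) : Int × Int) else (9, v)).1
        (if s == ">" then ((v - 1, -1) : Int × Int) else (9, v)).2 with
    | some n =>
      dsimp only
      obtain ⟨hint, hnc, hf⟩ := pickGo_eq_some _ rest res _ _ n (le_refl _) hp
      have hcand : CandP s v n := (cand_iff s v n).mp hint
      obtain ⟨hn0, hn9⟩ := candP_digit s v n h0 h9 hcand
      have hIH := ih (res ++ [n]) n (pyGet?_concat_neg_one res n) (by simp) hn0 hn9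
      rw [hf] at hIH
      have hfeas : feasible (s :: rest) v res = true := by
        rw [step_iff s rest v res hm h0 h9]
        exact ⟨n, hcand, by simpa using hnc, hf⟩
      rw [hfeas]
      exact hIH
    | none =>
      dsimp only
      have hnone := pickGo_eq_none _ rest res _ _ (le_refl _) hp
      cases hfeas : feasible (s :: rest) v res with
      | true =>
        rw [step_iff s rest v res hm h0 h9] at hfeas
        obtain ⟨n, hcand, hnu, hf⟩ := hfeas
        have hint := (cand_iff s v n).mpr hcand
        exact absurd ⟨by simpa using hnu, hf⟩ (hnone n hint.1 hint.2)
      | false => rfl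

theorem pyTruthy_extend (sign : List String) (res : List Int) (hres : res ≠ []) :
    pyTruthyL (extendGo sign res) = (extendGo sign res).isSome := by
  cases h : extendGo sign res with
  | none => rfl
  | some l =>
    have := extend_ne_nil sign res l hres h
    simp [pyTruthyL, this]

-- ---- the main loop equality: A's scan = B's pick-and-continue ----

theorem loop_eq (k : Nat) (rest : List String) (res : List Int) (n stop : Int)
    (hk : (n - stop).toNat ≤ k)
    (hres : res ≠ [])
    (hcands : ∀ m, stop < m → m ≤ n → 0 ≤ m ∧ m ≤ 9)
    (hbig : rest ≠ [] → ∀ (ys : List Int) (y : Int), 0 ≤ y → y ≤ 9 →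
      big rest (ys ++ [y]) = extendGo rest (ys ++ [y])) :
    bigLoop rest res n stop =
      (match pickGo rest res n stop with
       | none => none
       | some m => extendGo rest (res ++ [m])) := by
  induction k generalizing n with
  | zero =>
    rw [bigLoop, pickGo]
    split
    · omega
    · rfl
  | succ k ih =>
    rw [bigLoop, pickGo]
    split
    · rename_i hlt
      have hn := hcands n hlt (le_refl _)
      have hrec : ∀ m, stop < m → m ≤ n - 1 → 0 ≤ m ∧ m ≤ 9 :=
        fun m h1 h2 => hcands m h1 (by omega)
      cases hc : res.contains n with
      | true =>
        rw [if_pos rfl]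
        simp only [Bool.not_true, Bool.false_and]
        rw [if_neg (by simp : ¬(false = true))]
        exact ih (n - 1) (by omega) hrec
      | false =>
        rw [if_neg (by simp : ¬(false = true))]
        simp only [Bool.not_false, Bool.true_and]
        cases rest with
        | nil =>
          rw [if_neg (by simp : ¬(([] : List String).length > 0))]
          have hf : feasible [] n (res ++ [n]) = true := rfl
          rw [hf, if_pos rfl]
          rfl
        | cons t r =>
          rw [if_pos (by simp : (t :: r).length > 0)]
          have hres' : res ++ [n] ≠ [] := by simp
          have hbeq := hbig (by simp) res n hn.1 hn.2
          have htr := pyTruthy_extend (t :: r) (res ++ [n]) hres'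
          have hiso := extendGo_isSome (t :: r) (res ++ [n]) n
            (pyGet?_concat_neg_one res n) (by simp) hn.1 hn.2
          cases hf : feasible (t :: r) n (res ++ [n]) with
          | true =>
            have htb : pyTruthyL (big (t :: r) (res ++ [n])) = true := by
              rw [hbeq, htr, hiso, hf]
            rw [htb, if_pos rfl, if_pos rfl]
            exact hbeq
          | false =>
            have htb : pyTruthyL (big (t :: r) (res ++ [n])) = false := by
              rw [hbeq, htr, hiso, hf]
            rw [htb, if_neg (by simp : ¬(false = true)), if_neg (by simp : ¬(false = true))]
            exact ih (n - 1) (by omega) hrec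
    · rfl

theorem big_eq_extend (sign : List String) :
    ∀ (s : String) (rest : List String), sign = s :: rest →
      ∀ (xs : List Int) (x : Int),
        (if (s == ">") = true then x ≤ 10 else -1 ≤ x) →
        big sign (xs ++ [x]) = extendGo sign (xs ++ [x]) := by
  induction sign with
  | nil => intro s rest h; cases h
  | cons s0 rest0 ih =>
    intro s rest heq xs x hx
    cases heq
    have hlen : ¬((xs ++ [x]).length < 1) := by simp
    have hbig : rest0 ≠ [] → ∀ (ys : List Int) (y : Int), 0 ≤ y → y ≤ 9 →
        big rest0 (ys ++ [y]) = extendGo rest0 (ys ++ [y]) := by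
      intro hne ys y hy0 hy9
      obtain ⟨t, r, rfl⟩ := List.exists_cons_of_ne_nil hne
      exact ih t r rfl ys y (by by_cases ht : (t == ">") = true <;> simp [ht] <;> omega)
    unfold big
    rw [if_neg hlen, pyGet?_concat_len]
    unfold extendGo
    rw [pyGet?_concat_neg_one]
    dsimp only
    by_cases hs : (s0 == ">") = true
    · rw [if_pos hs, if_pos hs]
      rw [if_pos hs] at hx
      exact loop_eq ((x - 1) - (-1)).toNat rest0 (xs ++ [x]) (x - 1) (-1) (le_refl _)
        (by simp) (fun m h1 h2 => by omega) hbig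
    · rw [if_neg hs, if_neg hs]
      rw [if_neg hs] at hx
      exact loop_eq (9 - x).toNat rest0 (xs ++ [x]) 9 x (le_refl _)
        (by simp) (fun m h1 h2 => by omega) hbig

theorem init_eq (sign : List String) (hs : sign ≠ []) (k : Nat) :
    ∀ n : Int, (n + 1).toNat ≤ k → n ≤ 9 → bigInit sign n = bigAltInit sign n := by
  induction k with
  | zero =>
    intro n hk _
    rw [bigInit, bigAltInit]
    split
    · omega
    · rfl
  | succ k ih =>
    intro n hk h9
    rw [bigInit, bigAltInit]
    split
    · rename_i hlt
      dsimp only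
      have hbe : big sign [n] = extendGo sign [n] := by
        obtain ⟨t, r, rfl⟩ := List.exists_cons_of_ne_nil hs
        have := big_eq_extend (t :: r) t r rfl [] n
          (by by_cases ht : (t == ">") = true <;> simp [ht] <;> omega)
        simpa using this
      have htr := pyTruthy_extend sign [n] (by simp)
      have hiso := extendGo_isSome sign [n] n
        (pyGet?_concat_neg_one [] n) (by simp) (by omega) h9
      have hfb : feasible sign n [n] = feasible sign n ([] ++ [n]) := by simp
      cases hf : feasible sign n [n] with
      | true =>
        have htb : pyTruthyL (big sign [n]) = true := by
          rw [hbe, htr, hiso]; rw [hfb] at hf; simpa using hf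
        rw [htb, if_pos rfl, if_pos rfl]
        exact hbe
      | false =>
        have htb : pyTruthyL (big sign [n]) = false := by
          rw [hbe, htr, hiso]; rw [hfb] at hf; simpa using hf
        rw [htb, if_neg (by simp : ¬(false = true)), if_neg (by simp : ¬(false = true))]
        exact ih (n - 1) (by omega) (by omega)
    · rfl

-- ===== VERDICT (by name: the statement is the Claim_ definition above) =====
theorem big_spec : Claim_equal_big := by
  intro sign answer _ hpre
  obtain ⟨hsne, hlast⟩ := hpre
  unfold Spec_big
  cases hans : answer with
  | nil =>
    unfold big big_alt
    rw [if_pos (by simp), if_pos (by simp)]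
    exact init_eq sign hsne 10 9 (by omega) (by omega)
  | cons a as =>
    obtain ⟨s0, rest0, hsg⟩ := List.exists_cons_of_ne_nil hsne
    obtain ⟨xs, x, hx⟩ : ∃ xs x, answer = xs ++ [x] := by
      rcases List.eq_nil_or_concat answer with h | ⟨l, b, h⟩
      · rw [h] at hans; cases hans
      · exact ⟨l, b, by simpa using h⟩
    have hgl : answer.getLast? = some x := by
      rw [hx]; exact List.getLast?_concat
    rw [hsg, hgl] at hlast
    simp only [List.head?_cons] at hlast
    have hcond : if (s0 == ">") = true then x ≤ 10 else -1 ≤ x := by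
      by_cases h : (s0 == ">") = true <;> simp [h] at hlast ⊢ <;> omega
    rw [← hans, hx]
    have h1 := big_eq_extend sign s0 rest0 hsg xs x hcond
    unfold big_alt
    rw [if_neg (by simp)]
    exact h1
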